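-- pv_equiv track=rewrite | github.com/emarich/PROG1 | CV11/ul11_4_9.py | colIBiggestSum
-- ===== SOURCE A (Python) =====
-- def colIBiggestSum(t: list(list())) -> int:
--     sums = []
--     for j in range(len(t[0])):
--         sum = 0
--         for i in range(len(t)):
--             sum += t[i][j]
--         sums.append(sum)
--
--     return True if len(set(sums)) < len(sums) else False
-- ===== SOURCE B (Python) =====
-- def colIBiggestSum(t: list(list())) -> int:
--     sums = [sum(row[j] for row in t) for j in range(len(t[0]))]
--     s = sorted(sums)
--     return any(s[k] == s[k + 1] for k in range(len(s) - 1))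
-- ===== Notes on version B (the rewrite author's own statement) =====
-- stated objective: alternative
-- what changed: B computes the column sums with a comprehension and replaces A's hash-set duplicate test (len(set(sums)) < len(sums)) by sort-and-scan: sort the sums and return True iff some adjacent pair is equal.
import Mathlib
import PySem

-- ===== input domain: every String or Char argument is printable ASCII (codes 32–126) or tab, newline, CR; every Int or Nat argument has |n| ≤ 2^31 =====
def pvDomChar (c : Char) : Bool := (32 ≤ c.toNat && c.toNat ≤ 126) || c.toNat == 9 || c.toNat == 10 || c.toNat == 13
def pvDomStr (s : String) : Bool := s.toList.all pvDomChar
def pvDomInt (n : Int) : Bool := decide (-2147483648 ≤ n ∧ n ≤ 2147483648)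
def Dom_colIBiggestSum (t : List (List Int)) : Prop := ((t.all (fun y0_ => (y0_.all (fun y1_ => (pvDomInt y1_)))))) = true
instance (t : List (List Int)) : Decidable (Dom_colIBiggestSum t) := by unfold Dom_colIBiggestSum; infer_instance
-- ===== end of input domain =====

-- B replaces A's hash-set duplicate test on the column sums by a sort-and-scan of
-- adjacent pairs (same duplicate answer, different detection strategy); objective: alternative.

-- ===== PORT A =====
def colIBiggestSum (t : List (List Int)) : Bool :=
  let sums : List Int :=
    (PySem.List.pyRange 0 ((PySem.List.pyGetD t 0 []).length : Int)).foldl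
      (fun sums j =>
        sums ++ [(PySem.List.pyRange 0 (t.length : Int)).foldl
          (fun s i => s + PySem.List.pyGetD (PySem.List.pyGetD t i []) j 0) 0])
      []
  if (PySem.Set.ofList sums).length < sums.length then true else false

-- ===== PORT B =====
def colIBiggestSum_alt (t : List (List Int)) : Bool :=
  let sums : List Int :=
    (PySem.List.pyRange 0 ((PySem.List.pyGetD t 0 []).length : Int)).map
      (fun j => (t.map (fun row => PySem.List.pyGetD row j 0)).sum)
  let s := PySem.List.sorted sums (fun x => x) false
  (PySem.List.pyRange 0 ((s.length : Int) - 1)).any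
    (fun k => decide (PySem.List.pyGetD s k 0 = PySem.List.pyGetD s (k + 1) 0))

-- ===== PRECONDITION & SPEC =====
-- Pre_ excludes exactly the inputs where Python A raises IndexError: empty t (t[0])
-- and ragged tables with a row shorter than row 0 (t[i][j]); Python B raises there too.
def Pre_colIBiggestSum (t : List (List Int)) : Prop :=
  t ≠ [] ∧ ∀ row ∈ t, (t.headD []).length ≤ row.length
instance (t : List (List Int)) : Decidable (Pre_colIBiggestSum t) := by
  unfold Pre_colIBiggestSum; infer_instance
def pvWitness_colIBiggestSum : List (List Int) := [[1, 2], [3, 4]]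

def Spec_colIBiggestSum (t : List (List Int)) (out : Bool) : Prop := out = colIBiggestSum_alt t
instance (t : List (List Int)) (out : Bool) : Decidable (Spec_colIBiggestSum t out) := by
  unfold Spec_colIBiggestSum; infer_instance

-- ===== CLAIM (what is proved, stated in full; the proofs are below) =====
def Claim_equal_colIBiggestSum : Prop :=
  ∀ (t : List (List Int)), Dom_colIBiggestSum t → Pre_colIBiggestSum t →
    Spec_colIBiggestSum t (colIBiggestSum t)

-- ===== LEMMAS AND PROOFS =====

-- A's duplicate test: len(set(l)) < len(l) iff l has a duplicate.
lemma pv_ofList_lt_iff (l : List Int) :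
    (PySem.Set.ofList l).length < l.length ↔ ¬ l.Nodup := by
  have h1 : (PySem.Set.ofList l).length = l.dedup.length := by
    have hcard := List.toFinset_card_of_nodup (PySem.Set.nodup_ofList l)
    have h2 : (PySem.Set.ofList l).toFinset = l.toFinset := by
      ext x; simp [PySem.Set.mem_ofList]
    rw [← hcard, h2, List.card_toFinset]
  rw [h1]
  constructor
  · intro h hn
    rw [List.dedup_eq_self.mpr hn] at h
    omega
  · intro hn
    by_contra h
    push Not at h
    have heq := (List.dedup_sublist l).eq_of_length
      (le_antisymm (List.dedup_sublist l).length_le h)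
    exact hn (List.dedup_eq_self.mp heq)

-- B's duplicate test: some adjacent pair of sorted(l) is equal iff l has a duplicate.
lemma pv_any_adj (l : List Int) :
    ((PySem.List.pyRange 0 (((PySem.List.sorted l (fun x => x) false).length : Int) - 1)).any
      (fun k => decide (PySem.List.pyGetD (PySem.List.sorted l (fun x => x) false) k 0 =
                        PySem.List.pyGetD (PySem.List.sorted l (fun x => x) false) (k + 1) 0)) = true)
    ↔ ¬ l.Nodup := by
  set s := PySem.List.sorted l (fun x => x) false with hs
  have hperm : s.Perm l := PySem.List.sorted_perm l _ false
  rw [← hperm.nodup_iff, List.any_eq_true]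
  constructor
  · rintro ⟨k, hk, hdec⟩
    rw [PySem.List.mem_pyRange_one] at hk
    obtain ⟨hk0, hk1⟩ := hk
    rw [decide_eq_true_iff] at hdec
    rw [PySem.List.pyGetD_eq_getElem s 0 hk0 (by omega),
        PySem.List.pyGetD_eq_getElem s 0 (by omega) (by omega)] at hdec
    have hidx : (k + 1).toNat = k.toNat + 1 := by omega
    simp only [hidx] at hdec
    intro hnod
    have := (hnod.getElem_inj_iff (hi := by omega) (hj := by omega)).mp hdec
    omega
  · intro hnod
    by_contra hno
    push Not at hno
    apply hnod
    have hadj : ∀ (i : ℕ) (hi : i + 1 < s.length), s[i]'(Nat.lt_of_succ_lt hi) < s[i + 1]'hi := by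
      intro i hi
      have hle : s[i]'(Nat.lt_of_succ_lt hi) ≤ s[i + 1]'hi :=
        PySem.List.sorted_id_getElem_mono l (Nat.le_succ i) hi
      refine lt_of_le_of_ne hle ?_
      intro heq
      have hmem : (i : Int) ∈ PySem.List.pyRange 0 ((s.length : Int) - 1) :=
        PySem.List.mem_pyRange_one.mpr ⟨by omega, by omega⟩
      apply hno _ hmem
      rw [decide_eq_true_iff,
          PySem.List.pyGetD_eq_getElem s 0 (by omega) (by omega),
          PySem.List.pyGetD_eq_getElem s 0 (by omega) (by omega)]
      have hidx : ((i : Int) + 1).toNat = i + 1 := by omega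
      simp only [Int.toNat_natCast, hidx]
      exact heq
    have hpw : List.Pairwise (· < ·) s := by
      rw [List.pairwise_iff_getElem]
      intro i j hi hj hij
      have h1 := hadj i (by omega)
      have h2 : s[i + 1]'(by omega) ≤ s[j] :=
        PySem.List.sorted_id_getElem_mono l (by omega) hj
      exact lt_of_lt_of_le h1 h2
    exact hpw.imp ne_of_lt

-- The two ports build the SAME list of column sums.
lemma pv_sums_eq (t : List (List Int)) :
    (PySem.List.pyRange 0 ((PySem.List.pyGetD t 0 []).length : Int)).foldl
      (fun sums j =>
        sums ++ [(PySem.List.pyRange 0 (t.length : Int)).foldl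
          (fun s i => s + PySem.List.pyGetD (PySem.List.pyGetD t i []) j 0) 0])
      []
    = (PySem.List.pyRange 0 ((PySem.List.pyGetD t 0 []).length : Int)).map
        (fun j => (t.map (fun row => PySem.List.pyGetD row j 0)).sum) := by
  rw [PySem.List.foldl_append_singleton_eq_map]
  rw [List.nil_append]
  apply List.map_congr_left
  intro j _
  rw [PySem.List.foldl_pyRange_zero_pyGetD' t [] (fun s row => s + PySem.List.pyGetD row j 0) 0]
  rw [PySem.List.foldl_add]
  rw [zero_add]

lemma pv_main (t : List (List Int)) : colIBiggestSum t = colIBiggestSum_alt t := by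
  unfold colIBiggestSum colIBiggestSum_alt
  simp only []
  rw [pv_sums_eq]
  set sums := (PySem.List.pyRange 0 ((PySem.List.pyGetD t 0 []).length : Int)).map
      (fun j => (t.map (fun row => PySem.List.pyGetD row j 0)).sum) with hsums
  by_cases hP : (PySem.Set.ofList sums).length < sums.length
  · rw [if_pos hP]
    exact ((pv_any_adj sums).mpr ((pv_ofList_lt_iff sums).mp hP)).symm
  · rw [if_neg hP]
    symm
    rw [Bool.eq_false_iff]
    intro h
    exact hP ((pv_ofList_lt_iff sums).mpr ((pv_any_adj sums).mp h))

-- ===== VERDICT (by name: the statement is the Claim_ definition above) =====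
theorem colIBiggestSum_spec : Claim_equal_colIBiggestSum := by
  intro t _ _
  exact pv_main t
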